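-- pv_equiv track=rewrite | github.com/MrFengGG/PythonDemos | data_utils.py | data2_to_data1
-- ===== SOURCE A (Python) =====
-- import copy
--
-- def index_good_number(data,good_num=60000):
--     index = []
--     for i in range(len(data)):
--         if data[i]==good_num:
--             index.append(i)
--     return index
--
-- def data2_to_data1(data1,data2):
--     data2 = copy.deepcopy(data2)
--     index2 = index_good_number(data2)
--     index1 = index_good_number(data1)
--     for i in index2:
--         if i not in index1:
--             data2[i] = data1[i]
--     return data2
-- ===== SOURCE B (Python) =====
-- def data2_to_data1(data1, data2):
--     return [data1[i] if v == 60000 and data1[i] != 60000 else v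
--             for i, v in enumerate(data2)]
-- ===== Notes on version B (the rewrite author's own statement) =====
-- stated objective: simpler
-- what changed: Replaces the two index_good_number passes plus a membership scan over the index list with a single list comprehension that tests the replacement condition (data2[i]==60000 and data1[i]!=60000) directly per position.
import Mathlib
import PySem

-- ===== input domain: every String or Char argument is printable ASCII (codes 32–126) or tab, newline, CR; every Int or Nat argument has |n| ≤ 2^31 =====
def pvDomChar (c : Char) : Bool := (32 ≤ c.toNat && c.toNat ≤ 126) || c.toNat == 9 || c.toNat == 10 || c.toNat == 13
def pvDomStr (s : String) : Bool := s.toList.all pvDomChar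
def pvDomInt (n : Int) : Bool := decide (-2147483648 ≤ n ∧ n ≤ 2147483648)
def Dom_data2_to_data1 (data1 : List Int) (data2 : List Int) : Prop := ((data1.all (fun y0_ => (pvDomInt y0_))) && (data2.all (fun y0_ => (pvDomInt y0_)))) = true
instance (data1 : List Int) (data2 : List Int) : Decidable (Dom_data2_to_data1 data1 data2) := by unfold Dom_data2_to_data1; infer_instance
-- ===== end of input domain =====

-- ===== PORT A =====
-- B is a single comprehension computing the replacement condition inline; A builds two
-- index lists and scans one for membership. Proven equal wherever A returns (Pre_).
-- index = []; for i in range(len(data)): if data[i]==good_num: index.append(i)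
def index_good_number (data : List Int) (good_num : Int) : List Int :=
  (PySem.List.pyRange 0 data.length 1).foldl
    (fun index i => if PySem.List.pyGetD data i 0 = good_num then index ++ [i] else index) []

-- for i in index2: if i not in index1: data2[i] = data1[i]
-- (the access data1[i] raises IndexError when i ≥ len(data1); Pre_ excludes that, so the
--  total form pyGetD data1 i 0 is exact on Pre_)
def data2_to_data1 (data1 : List Int) (data2 : List Int) : List Int :=
  let index2 := index_good_number data2 60000
  let index1 := index_good_number data1 60000
  index2.foldl
    (fun d i => if i ∈ index1 then d
                else PySem.List.pySetD d i (PySem.List.pyGetD data1 i 0)) data2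

-- ===== PORT B =====
-- [data1[i] if v == 60000 and data1[i] != 60000 else v for i, v in enumerate(data2)]
-- (data1[i] is only reached when v == 60000; Pre_ makes it in range, so pyGetD is exact)
def data2_to_data1_alt (data1 : List Int) (data2 : List Int) : List Int :=
  (PySem.List.enumerate data2 0).map (fun p =>
    if p.2 = 60000 ∧ PySem.List.pyGetD data1 p.1 0 ≠ 60000
    then PySem.List.pyGetD data1 p.1 0 else p.2)

-- ===== PRECONDITION & SPEC =====
-- Pre_ excludes exactly the inputs where A raises IndexError: some position holding 60000
-- in data2 lies beyond the end of data1 (B raises there too).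
def Pre_data2_to_data1 (data1 : List Int) (data2 : List Int) : Prop :=
  ∀ k : Nat, k < data2.length → data2.getD k 0 = 60000 → k < data1.length
instance (data1 : List Int) (data2 : List Int) : Decidable (Pre_data2_to_data1 data1 data2) := by
  unfold Pre_data2_to_data1; infer_instance
def pvWitness_data2_to_data1 : List Int × List Int := ([1, 2, 60000], [60000, 5, 60000])
def Spec_data2_to_data1 (data1 : List Int) (data2 : List Int) (out : List Int) : Prop := out = data2_to_data1_alt data1 data2
instance (data1 : List Int) (data2 : List Int) (out : List Int) : Decidable (Spec_data2_to_data1 data1 data2 out) := by unfold Spec_data2_to_data1; infer_instance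

-- ===== CLAIM (what is proved, stated in full; the proofs are below) =====
def Claim_equal_data2_to_data1 : Prop := ∀ (data1 : List Int) (data2 : List Int), Dom_data2_to_data1 data1 data2 → Pre_data2_to_data1 data1 data2 → Spec_data2_to_data1 data1 data2 (data2_to_data1 data1 data2)

-- ===== LEMMAS AND PROOFS =====

theorem mem_index_good_number (data : List Int) (g i : Int) :
    i ∈ index_good_number data g ↔ 0 ≤ i ∧ i < (data.length : Int) ∧ PySem.List.pyGetD data i 0 = g := by
  unfold index_good_number
  rw [PySem.List.foldl_append_ite_eq_filter]
  simp [List.mem_filter, PySem.List.mem_pyRange_one, and_assoc]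

theorem length_foldl_step (data1 : List Int) (index1 : List Int) (L : List Int) (d : List Int) :
    (L.foldl (fun d i => if i ∈ index1 then d
                else PySem.List.pySetD d i (PySem.List.pyGetD data1 i 0)) d).length = d.length := by
  induction L generalizing d with
  | nil => rfl
  | cons i L ih =>
      simp only [List.foldl_cons]
      rw [ih]
      split
      · rfl
      · exact PySem.List.length_pySetD d i _

theorem pyGetD_foldl_step (data1 : List Int) (index1 : List Int) (L : List Int) (d : List Int)
    (hL : ∀ i ∈ L, 0 ≤ i ∧ i < (d.length : Int)) (k : Nat) :
    PySem.List.pyGetD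
      (L.foldl (fun d i => if i ∈ index1 then d
                else PySem.List.pySetD d i (PySem.List.pyGetD data1 i 0)) d) (k : Int) 0 =
    if (k : Int) ∈ L ∧ (k : Int) ∉ index1 then PySem.List.pyGetD data1 (k : Int) 0
    else PySem.List.pyGetD d (k : Int) 0 := by
  induction L generalizing d with
  | nil => simp
  | cons i L ih =>
      obtain ⟨hi0, hilt⟩ := hL i (List.mem_cons_self)
      simp only [List.foldl_cons]
      by_cases hmem : i ∈ index1
      · rw [if_pos hmem, ih d (fun j hj => hL j (List.mem_cons_of_mem i hj))]
        by_cases hk : (k : Int) ∈ L ∧ (k : Int) ∉ index1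
        · rw [if_pos hk, if_pos ⟨List.mem_cons_of_mem i hk.1, hk.2⟩]
        · rw [if_neg hk]
          by_cases hk2 : (k : Int) ∈ i :: L ∧ (k : Int) ∉ index1
          · rcases List.mem_cons.1 hk2.1 with h | h
            · exact absurd hmem (h ▸ hk2.2)
            · exact absurd ⟨h, hk2.2⟩ hk
          · rw [if_neg hk2]
      · rw [if_neg hmem]
        have hlen : ((PySem.List.pySetD d i (PySem.List.pyGetD data1 i 0)).length : Int) = (d.length : Int) := by
          rw [PySem.List.length_pySetD]
        rw [ih _ (fun j hj => by
          obtain ⟨h0, h1⟩ := hL j (List.mem_cons_of_mem i hj)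
          exact ⟨h0, by rw [hlen]; exact h1⟩)]
        have hset : PySem.List.pyGetD (PySem.List.pySetD d i (PySem.List.pyGetD data1 i 0)) (k : Int) 0 =
            if (k : Int) = i then PySem.List.pyGetD data1 i 0 else PySem.List.pyGetD d (k : Int) 0 := by
          have hcast : i = ((i.toNat : Nat) : Int) := by omega
          rw [hcast]
          rw [PySem.List.pyGetD_pySetD_natCast d i.toNat k _ 0 (by omega)]
          by_cases hki : k = i.toNat
          · rw [if_pos hki, if_pos (by omega)]
          · rw [if_neg hki, if_neg (by omega)]
        by_cases hk : (k : Int) ∈ L ∧ (k : Int) ∉ index1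
        · rw [if_pos hk, if_pos ⟨List.mem_cons_of_mem i hk.1, hk.2⟩]
        · rw [if_neg hk, hset]
          by_cases hki : (k : Int) = i
          · rw [if_pos hki, if_pos ⟨by rw [hki]; exact List.mem_cons_self, by rw [hki]; exact hmem⟩, hki]
          · rw [if_neg hki]
            by_cases hk2 : (k : Int) ∈ i :: L ∧ (k : Int) ∉ index1
            · rcases List.mem_cons.1 hk2.1 with h | h
              · exact absurd h hki
              · exact absurd ⟨h, hk2.2⟩ hk
            · rw [if_neg hk2]

-- ===== VERDICT (by name: the statement is the Claim_ definition above) =====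
theorem data2_to_data1_spec : Claim_equal_data2_to_data1 := by
  intro data1 data2 _ hpre
  unfold Spec_data2_to_data1
  unfold data2_to_data1 data2_to_data1_alt
  simp only []
  apply List.ext_getElem
  · rw [length_foldl_step]
    simp [PySem.List.length_enumerate]
  · intro k h1 h2
    rw [length_foldl_step] at h1
    have hk2 : k < data2.length := h1
    -- right side
    have hr : ((PySem.List.enumerate data2 0).map (fun p =>
        if p.2 = 60000 ∧ PySem.List.pyGetD data1 p.1 0 ≠ 60000
        then PySem.List.pyGetD data1 p.1 0 else p.2))[k] =
        (if data2[k] = 60000 ∧ PySem.List.pyGetD data1 (k : Int) 0 ≠ 60000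
         then PySem.List.pyGetD data1 (k : Int) 0 else data2[k]) := by
      rw [List.getElem_map]
      rw [PySem.List.getElem_enumerate]
      simp
    rw [hr]
    have hl := pyGetD_foldl_step data1 (index_good_number data1 60000)
      (index_good_number data2 60000) data2
      (fun i hi => by
        rw [mem_index_good_number] at hi
        exact ⟨hi.1, hi.2.1⟩) k
    have hget : PySem.List.pyGetD data2 (k : Int) 0 = data2[k] := by
      rw [PySem.List.pyGetD_natCast]; exact List.getD_eq_getElem data2 0 hk2
    have hgetres : (((index_good_number data2 60000).foldl (fun d i => if i ∈ index_good_number data1 60000 then d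
                else PySem.List.pySetD d i (PySem.List.pyGetD data1 i 0)) data2))[k] =
        PySem.List.pyGetD ((index_good_number data2 60000).foldl (fun d i => if i ∈ index_good_number data1 60000 then d
                else PySem.List.pySetD d i (PySem.List.pyGetD data1 i 0)) data2) (k : Int) 0 := by
      rw [PySem.List.pyGetD_natCast]
      exact (List.getD_eq_getElem _ 0 (by rw [length_foldl_step]; exact hk2)).symm
    rw [hgetres, hl]
    simp only [mem_index_good_number, hget]
    by_cases hc : data2[k] = 60000 ∧ PySem.List.pyGetD data1 (k : Int) 0 ≠ 60000
    · rw [if_pos hc]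
      rw [if_pos]
      constructor
      · exact ⟨Int.natCast_nonneg k, by exact_mod_cast hk2, hc.1⟩
      · intro ⟨_, _, hbad⟩
        exact hc.2 hbad
    · rw [if_neg hc, if_neg]
      intro ⟨⟨_, _, hval⟩, hnot1⟩
      have h2v : data2[k] = 60000 := hval
      have hk1 : k < data1.length := hpre k hk2 (by rw [List.getD_eq_getElem data2 0 hk2]; exact h2v)
      apply hnot1
      refine ⟨Int.natCast_nonneg k, by exact_mod_cast hk1, ?_⟩
      by_contra hne
      exact hc ⟨h2v, fun heq => hne heq⟩
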